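-- pv_equiv track=rewrite | github.com/NeKroFR/Maskpy2 | vm_crypto.py | xtea_encrypt
-- ===== SOURCE A (Python) =====
-- MASK32 = 0xFFFFFFFF
--
-- def xtea_encrypt(v0, v1, key):
--     delta = 0x9E3779B9
--     s = 0
--     for _ in range(32):
--         v0 = (v0 + ((((v1 << 4) ^ (v1 >> 5)) + v1) ^ (s + key[s & 3]))) & MASK32
--         s = (s + delta) & MASK32
--         v1 = (v1 + ((((v0 << 4) ^ (v0 >> 5)) + v0) ^ (s + key[(s >> 11) & 3]))) & MASK32
--     return v0, v1
-- ===== SOURCE B (Python) =====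
-- MASK32 = 0xFFFFFFFF
--
-- def xtea_encrypt(v0, v1, key):
--     # Phase 1: precompute the 64 half-round subkeys (input-state independent).
--     delta = 0x9E3779B9
--     s = 0
--     ks = []
--     for _ in range(32):
--         ks.append(s + key[s & 3])
--         s = (s + delta) & MASK32
--         ks.append(s + key[(s >> 11) & 3])
--     # Phase 2: one flat Feistel pass of 64 half-rounds over a swapping pair.
--     u, w = v1, v0
--     for k in ks:
--         u, w = (w + ((((u << 4) ^ (u >> 5)) + u) ^ k)) & MASK32, u
--     return w, u
-- ===== Notes on version B (the rewrite author's own statement) =====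
-- stated objective: alternative
-- what changed: B first precomputes the 64 half-round subkeys in a separate key-schedule pass, then applies one flat fold of 64 identical Feistel half-rounds over a swapping pair, instead of A's single loop of 32 asymmetric double-update rounds with the running sum interleaved.
-- outside the precondition, e.g. on xtea_encrypt(1, 2, [1, 2, 3]): A raises IndexError, B raises IndexError
import Mathlib
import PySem

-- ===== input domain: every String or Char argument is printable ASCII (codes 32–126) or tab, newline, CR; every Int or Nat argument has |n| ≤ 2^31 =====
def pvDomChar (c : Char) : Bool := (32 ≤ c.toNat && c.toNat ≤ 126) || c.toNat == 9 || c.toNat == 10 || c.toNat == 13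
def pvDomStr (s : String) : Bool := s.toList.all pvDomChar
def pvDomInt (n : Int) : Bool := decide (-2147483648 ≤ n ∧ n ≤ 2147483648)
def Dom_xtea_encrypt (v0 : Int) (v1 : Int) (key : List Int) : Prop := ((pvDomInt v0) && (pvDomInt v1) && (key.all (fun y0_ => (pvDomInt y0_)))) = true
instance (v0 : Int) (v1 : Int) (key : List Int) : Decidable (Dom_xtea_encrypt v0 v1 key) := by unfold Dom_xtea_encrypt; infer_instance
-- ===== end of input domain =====

-- B splits the cipher into a key-schedule phase (64 precomputed half-round subkeys) followed by one
-- flat fold of 64 symmetric Feistel half-rounds over a swapping pair ('alternative'; same cost).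

-- ===== PORT A =====
-- one iteration of A's for-body: updates v0, then s, then v1, in A's order
def pvRoundA (key : List Int) (st : Int × Int × Int) : Int × Int × Int :=
  match st with
  | (v0, v1, s) =>
    let v0' := PySem.Int.band (v0 + PySem.Int.bxor ((PySem.Int.bxor (v1 <<< 4) (v1 >>> 5)) + v1) (s + PySem.List.pyGetD key (PySem.Int.band s 3) 0)) 4294967295
    let s' := PySem.Int.band (s + 2654435769) 4294967295
    let v1' := PySem.Int.band (v1 + PySem.Int.bxor ((PySem.Int.bxor (v0' <<< 4) (v0' >>> 5)) + v0') (s' + PySem.List.pyGetD key (PySem.Int.band (s' >>> 11) 3) 0)) 4294967295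
    (v0', v1', s')

def xtea_encrypt (v0 : Int) (v1 : Int) (key : List Int) : Int × Int :=
  let st := (PySem.List.pyRange 0 32 1).foldl (fun st _ => pvRoundA key st) (v0, v1, 0)
  (st.1, st.2.1)

-- ===== PORT B =====
-- one iteration of B's schedule loop: appends the two subkeys of a round, advancing s in between
def pvSchedStep (key : List Int) (st : Int × List Int) : Int × List Int :=
  match st with
  | (s, ks) =>
    let ks' := ks ++ [s + PySem.List.pyGetD key (PySem.Int.band s 3) 0]
    let s' := PySem.Int.band (s + 2654435769) 4294967295
    (s', ks' ++ [s' + PySem.List.pyGetD key (PySem.Int.band (s' >>> 11) 3) 0])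

-- one Feistel half-round on the swapping pair (u, w): w is updated from u, then they swap
def pvHalfStep (st : Int × Int) (k : Int) : Int × Int :=
  match st with
  | (u, w) => (PySem.Int.band (w + PySem.Int.bxor ((PySem.Int.bxor (u <<< 4) (u >>> 5)) + u) k) 4294967295, u)

def xtea_encrypt_alt (v0 : Int) (v1 : Int) (key : List Int) : Int × Int :=
  let r := (PySem.List.pyRange 0 32 1).foldl (fun st _ => pvSchedStep key st) (0, [])
  let p := r.2.foldl pvHalfStep (v1, v0)
  (p.2, p.1)

-- ===== PRECONDITION & SPEC =====
-- Pre_ excludes keys with fewer than 4 words, on which Python A raises IndexError (all indices 0..3 occur)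
def Pre_xtea_encrypt (v0 : Int) (v1 : Int) (key : List Int) : Prop := 4 ≤ key.length
instance (v0 : Int) (v1 : Int) (key : List Int) : Decidable (Pre_xtea_encrypt v0 v1 key) := by unfold Pre_xtea_encrypt; infer_instance
def pvWitness_xtea_encrypt : Int × Int × List Int := (1, 2, [1, 2, 3, 4])

def Spec_xtea_encrypt (v0 : Int) (v1 : Int) (key : List Int) (out : Int × Int) : Prop := out = xtea_encrypt_alt v0 v1 key
instance (v0 : Int) (v1 : Int) (key : List Int) (out : Int × Int) : Decidable (Spec_xtea_encrypt v0 v1 key out) := by unfold Spec_xtea_encrypt; infer_instance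

-- ===== CLAIM (what is proved, stated in full; the proofs are below) =====
def Claim_equal_xtea_encrypt : Prop := ∀ (v0 : Int) (v1 : Int) (key : List Int), Dom_xtea_encrypt v0 v1 key → Pre_xtea_encrypt v0 v1 key → Spec_xtea_encrypt v0 v1 key (xtea_encrypt v0 v1 key)

-- ===== LEMMAS AND PROOFS =====

-- a foldl whose body ignores the element is an iterate of the body
theorem pv_foldl_ignore {σ α : Type} (g : σ → σ) (l : List α) (init : σ) :
    l.foldl (fun st _ => g st) init = g^[l.length] init := by
  induction l generalizing init with
  | nil => rfl
  | cons x xs ih => simp [Function.iterate_succ_apply, ih]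

-- the schedule of n rounds starting at running sum s, written as a structural recursion
def pvKsAux (key : List Int) (s : Int) : Nat → List Int
  | 0 => []
  | n + 1 =>
    (s + PySem.List.pyGetD key (PySem.Int.band s 3) 0) ::
    (PySem.Int.band (s + 2654435769) 4294967295 +
      PySem.List.pyGetD key (PySem.Int.band ((PySem.Int.band (s + 2654435769) 4294967295) >>> 11) 3) 0) ::
    pvKsAux key (PySem.Int.band (s + 2654435769) 4294967295) n

-- B's schedule fold produces exactly pvKsAux
theorem pv_sched_spec (key : List Int) (n : Nat) : ∀ (s : Int) (acc : List Int),
    ((pvSchedStep key)^[n] (s, acc)).2 = acc ++ pvKsAux key s n := by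
  induction n with
  | zero => intro s acc; simp [pvKsAux]
  | succ n ih =>
    intro s acc
    rw [Function.iterate_succ_apply]
    simp [pvSchedStep, ih, pvKsAux]

-- the core correspondence: 2n half-rounds over the schedule = n rounds of A (pair swapped)
theorem pv_half_round (key : List Int) (n : Nat) : ∀ (v0 v1 s : Int),
    (pvKsAux key s n).foldl pvHalfStep (v1, v0) =
      (((pvRoundA key)^[n] (v0, v1, s)).2.1, ((pvRoundA key)^[n] (v0, v1, s)).1) := by
  induction n with
  | zero => intro v0 v1 s; rfl
  | succ n ih =>
    intro v0 v1 s
    rw [Function.iterate_succ_apply]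
    simp only [pvKsAux, List.foldl_cons, pvHalfStep, pvRoundA]
    exact ih _ _ _

-- ===== VERDICT (by name: the statement is the Claim_ definition above) =====
theorem xtea_encrypt_spec : Claim_equal_xtea_encrypt := by
  intro v0 v1 key _ _
  unfold Spec_xtea_encrypt xtea_encrypt xtea_encrypt_alt
  rw [pv_foldl_ignore, pv_foldl_ignore]
  have hlen : (PySem.List.pyRange 0 32 1).length = 32 := by decide
  rw [hlen]
  simp only [pv_sched_spec key 32 0 [], List.nil_append, pv_half_round key 32 v0 v1 0]
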